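-- pv_equiv track=rewrite | github.com/huifer/wellally-schemas | archive/wellally-health-data-anonymizer/language/python/wellally_health_data_anonymizer/anonymizer.py | calculate_k_anonymity
-- ===== SOURCE A (Python) =====
-- from typing import Dict, List, Optional, Any
--
-- def calculate_k_anonymity(
--
--     records: List[Dict[str, Any]],
--     quasi_identifiers: List[str]
-- ) -> int:
--     """
--     Calculate k-anonymity value.
--
--     K-anonymity: minimum group size when grouped by quasi-identifiers.
--     Higher k = better privacy.
--
--     Args:
--         records: List of records
--         quasi_identifiers: Fields that could identify individuals
--
--     Returns:
--         K value (minimum group size)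
--     """
--     # Group records by quasi-identifier values
--     groups: Dict[tuple, int] = {}
--
--     for record in records:
--         # Create key from quasi-identifiers
--         key_values = tuple(
--             str(record.get(qi, "")) for qi in quasi_identifiers
--         )
--         groups[key_values] = groups.get(key_values, 0) + 1
--
--     # K is the minimum group size
--     if not groups:
--         return 0
--
--     return min(groups.values())
-- ===== SOURCE B (Python) =====
-- def calculate_k_anonymity(records, quasi_identifiers):
--     # sort the key tuples, then scan consecutive runs and keep the smallest run length
--     keys = sorted(tuple(str(r.get(qi, "")) for qi in quasi_identifiers) for r in records)
--     if not keys: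
--         return 0
--     best = len(keys)
--     run = 1
--     prev = keys[0]
--     for key in keys[1:]:
--         if key == prev:
--             run += 1
--         else:
--             best = min(best, run)
--             run = 1
--             prev = key
--     return min(best, run)
-- ===== Notes on version B (the rewrite author's own statement) =====
-- stated objective: alternative
-- what changed: B replaces A's hash-map count accumulation by sort-then-scan: it sorts the list of key tuples and walks consecutive equal runs once, keeping the smallest run length (0 for no records).
import Mathlib
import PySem

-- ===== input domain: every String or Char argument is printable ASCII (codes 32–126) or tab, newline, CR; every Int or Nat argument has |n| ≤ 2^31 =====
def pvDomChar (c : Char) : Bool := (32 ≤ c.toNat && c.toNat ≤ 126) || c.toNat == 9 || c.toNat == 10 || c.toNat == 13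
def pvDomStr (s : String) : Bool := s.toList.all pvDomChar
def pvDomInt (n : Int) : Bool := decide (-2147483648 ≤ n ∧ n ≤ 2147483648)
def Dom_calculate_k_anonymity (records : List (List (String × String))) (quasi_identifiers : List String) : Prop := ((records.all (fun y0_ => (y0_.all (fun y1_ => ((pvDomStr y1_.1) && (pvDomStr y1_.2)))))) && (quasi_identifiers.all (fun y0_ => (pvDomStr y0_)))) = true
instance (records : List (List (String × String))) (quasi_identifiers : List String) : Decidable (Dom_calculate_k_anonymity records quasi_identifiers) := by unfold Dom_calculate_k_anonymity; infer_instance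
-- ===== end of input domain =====

-- B sorts the key tuples and scans consecutive runs for the smallest run length,
-- instead of A's hash-map count accumulation; objective: alternative, not faster.


-- key_values = tuple(str(record.get(qi, "")) for qi in quasi_identifiers); values are strings, so str() is the identity
def pvKey (quasi_identifiers : List String) (record : List (String × String)) : List String :=
  quasi_identifiers.map (fun qi => (PySem.Dict.ofList record).getD qi "")

-- ===== PORT A =====
def calculate_k_anonymity (records : List (List (String × String))) (quasi_identifiers : List String) : Int :=
  -- groups[key] = groups.get(key, 0) + 1 over all records
  let groups : PySem.Dict (List String) Int :=
    records.foldl (fun d r => d.insert (pvKey quasi_identifiers r) (d.getD (pvKey quasi_identifiers r) 0 + 1)) PySem.Dict.empty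
  if PySem.Dict.size groups = 0 then 0
  else (PySem.List.min? (PySem.Dict.values groups) (fun x => x)).getD 0

-- ===== PORT B =====
-- the for-loop over keys[1:] with state (prev, run, best)
def pvScan (prev : List String) (run best : Int) : List (List String) → Int
  | [] => min best run
  | k :: ks => if k = prev then pvScan prev (run + 1) best ks
               else pvScan k 1 (min best run) ks

def calculate_k_anonymity_alt (records : List (List (String × String))) (quasi_identifiers : List String) : Int :=
  let keys := PySem.List.sorted (records.map (pvKey quasi_identifiers)) (fun x => x) false
  match keys with
  | [] => 0
  | k0 :: rest => pvScan k0 1 ((k0 :: rest).length : Int) rest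

-- ===== PRECONDITION & SPEC =====
def Spec_calculate_k_anonymity (records : List (List (String × String))) (quasi_identifiers : List String) (out : Int) : Prop := out = calculate_k_anonymity_alt records quasi_identifiers
instance (records : List (List (String × String))) (quasi_identifiers : List String) (out : Int) : Decidable (Spec_calculate_k_anonymity records quasi_identifiers out) := by unfold Spec_calculate_k_anonymity; infer_instance

-- ===== CLAIM (what is proved, stated in full; the proofs are below) =====
def Claim_equal_calculate_k_anonymity : Prop := ∀ (records : List (List (String × String))) (quasi_identifiers : List String), Dom_calculate_k_anonymity records quasi_identifiers → Spec_calculate_k_anonymity records quasi_identifiers (calculate_k_anonymity records quasi_identifiers)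

-- ===== LEMMAS AND PROOFS =====

-- minimum (with multiplicity) of the per-element group sizes of l
def pvMinCounts (l : List (List String)) : Int :=
  (PySem.List.min? (l.map (fun k => (l.count k : Int))) (fun x => x)).getD 0

-- min over a nonempty list depends only on which values occur in it
theorem minD_congr_mem (L1 L2 : List Int) (h1 : L1 ≠ []) (h2 : L2 ≠ [])
    (hm : ∀ x, x ∈ L1 ↔ x ∈ L2) :
    (PySem.List.min? L1 (fun x => x)).getD 0 = (PySem.List.min? L2 (fun x => x)).getD 0 := by
  obtain ⟨m1, hm1⟩ : ∃ m, PySem.List.min? L1 (fun x => x) = some m := by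
    cases h : PySem.List.min? L1 (fun x => x) with
    | none => exact absurd ((PySem.List.min?_eq_none_iff L1 _).mp h) h1
    | some m => exact ⟨m, rfl⟩
  obtain ⟨m2, hm2⟩ : ∃ m, PySem.List.min? L2 (fun x => x) = some m := by
    cases h : PySem.List.min? L2 (fun x => x) with
    | none => exact absurd ((PySem.List.min?_eq_none_iff L2 _).mp h) h2
    | some m => exact ⟨m, rfl⟩
  rw [hm1, hm2]
  simp only [Option.getD_some]
  have e1 : m1 ∈ L2 := (hm m1).mp (PySem.List.min?_mem hm1)
  have e2 : m2 ∈ L1 := (hm m2).mpr (PySem.List.min?_mem hm2)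
  exact le_antisymm (PySem.List.min?_isMin hm1 m2 e2) (PySem.List.min?_isMin hm2 m1 e1)

theorem pvMinCounts_congr (l1 l2 : List (List String)) (h : l1.Perm l2) :
    pvMinCounts l1 = pvMinCounts l2 := by
  unfold pvMinCounts
  cases hn : l1 with
  | nil => subst hn; rw [List.Perm.nil_eq h]
  | cons a t =>
    subst hn
    apply minD_congr_mem
    · simp
    · have := h.length_eq; cases l2 <;> simp_all
    · intro x
      simp only [List.mem_map]
      constructor
      · rintro ⟨k, hk, rfl⟩
        exact ⟨k, h.mem_iff.mp hk, by rw [h.count_eq]⟩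
      · rintro ⟨k, hk, rfl⟩
        exact ⟨k, h.mem_iff.mpr hk, by rw [h.count_eq]⟩

theorem pvMinCounts_le_count (l : List (List String)) (k : List String) (hk : k ∈ l) :
    pvMinCounts l ≤ (l.count k : Int) := by
  unfold pvMinCounts
  have hmem : (l.count k : Int) ∈ l.map (fun k => (l.count k : Int)) :=
    List.mem_map.mpr ⟨k, hk, rfl⟩
  obtain ⟨m, hm⟩ : ∃ m, PySem.List.min? (l.map (fun k => (l.count k : Int))) (fun x => x) = some m := by
    cases h : PySem.List.min? (l.map (fun k => (l.count k : Int))) (fun x => x) with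
    | none =>
      exfalso
      have := (PySem.List.min?_eq_none_iff _ _).mp h
      rw [this] at hmem; exact (List.not_mem_nil) hmem
    | some m => exact ⟨m, rfl⟩
  rw [hm, Option.getD_some]
  exact PySem.List.min?_isMin hm _ hmem

-- min of a nonempty Int list splits over ++
theorem minD_append (L1 L2 : List Int) (h1 : L1 ≠ []) (h2 : L2 ≠ []) :
    (PySem.List.min? (L1 ++ L2) (fun x => x)).getD 0
      = min ((PySem.List.min? L1 (fun x => x)).getD 0) ((PySem.List.min? L2 (fun x => x)).getD 0) := by
  obtain ⟨m1, hm1⟩ : ∃ m, PySem.List.min? L1 (fun x => x) = some m := by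
    cases h : PySem.List.min? L1 (fun x => x) with
    | none => exact absurd ((PySem.List.min?_eq_none_iff L1 _).mp h) h1
    | some m => exact ⟨m, rfl⟩
  obtain ⟨m2, hm2⟩ : ∃ m, PySem.List.min? L2 (fun x => x) = some m := by
    cases h : PySem.List.min? L2 (fun x => x) with
    | none => exact absurd ((PySem.List.min?_eq_none_iff L2 _).mp h) h2
    | some m => exact ⟨m, rfl⟩
  obtain ⟨m, hm⟩ : ∃ m, PySem.List.min? (L1 ++ L2) (fun x => x) = some m := by
    cases h : PySem.List.min? (L1 ++ L2) (fun x => x) with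
    | none =>
      have := (PySem.List.min?_eq_none_iff (L1 ++ L2) _).mp h
      exact absurd (List.append_eq_nil_iff.mp this).1 h1
    | some m => exact ⟨m, rfl⟩
  rw [hm, hm1, hm2]
  simp only [Option.getD_some]
  apply le_antisymm
  · apply le_min
    · exact PySem.List.min?_isMin hm m1 (List.mem_append_left _ (PySem.List.min?_mem hm1))
    · exact PySem.List.min?_isMin hm m2 (List.mem_append_right _ (PySem.List.min?_mem hm2))
  · rcases List.mem_append.mp (PySem.List.min?_mem hm) with h | h
    · exact le_trans (min_le_left _ _) (PySem.List.min?_isMin hm1 m h)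
    · exact le_trans (min_le_right _ _) (PySem.List.min?_isMin hm2 m h)

theorem pvMinCounts_append (l1 l2 : List (List String)) (h1 : l1 ≠ []) (h2 : l2 ≠ [])
    (hdisj : ∀ x ∈ l1, x ∉ l2) :
    pvMinCounts (l1 ++ l2) = min (pvMinCounts l1) (pvMinCounts l2) := by
  unfold pvMinCounts
  have hmap : (l1 ++ l2).map (fun k => ((l1 ++ l2).count k : Int))
      = l1.map (fun k => (l1.count k : Int)) ++ l2.map (fun k => (l2.count k : Int)) := by
    rw [List.map_append]
    congr 1
    · apply List.map_congr_left
      intro k hk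
      have : l2.count k = 0 := List.count_eq_zero.mpr (hdisj k hk)
      simp [List.count_append, this]
    · apply List.map_congr_left
      intro k hk
      have hk1 : k ∉ l1 := fun h => (hdisj k h) hk
      have : l1.count k = 0 := List.count_eq_zero.mpr hk1
      simp [List.count_append, this]
  rw [hmap]
  exact minD_append _ _ (by simpa using h1) (by simpa using h2)

-- pvMinCounts of a constant nonempty list
theorem pvMinCounts_replicate (n : Nat) (hn : 1 ≤ n) (p : List String) :
    pvMinCounts (List.replicate n p) = (n : Int) := by
  unfold pvMinCounts
  obtain ⟨m, hm⟩ : ∃ m, PySem.List.min? ((List.replicate n p).map (fun k => ((List.replicate n p).count k : Int))) (fun x => x) = some m := by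
    cases h : PySem.List.min? ((List.replicate n p).map (fun k => ((List.replicate n p).count k : Int))) (fun x => x) with
    | none =>
      have := (PySem.List.min?_eq_none_iff _ _).mp h
      simp [List.eq_nil_iff_forall_not_mem] at this
      omega
    | some m => exact ⟨m, rfl⟩
  rw [hm, Option.getD_some]
  have := PySem.List.min?_mem hm
  obtain ⟨k, hk, rfl⟩ := List.mem_map.mp this
  have : k = p := List.eq_of_mem_replicate hk
  subst this
  rw [List.count_replicate_self]

-- the run scan on a sorted (Pairwise ≤) tail computes min best (minCounts of the whole run list)
theorem pvScan_spec (s : List (List String)) : ∀ (prev : List String) (run best : Int)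
    (hr : 1 ≤ run) (hs : (prev :: s).Pairwise (· ≤ ·)),
    pvScan prev run best s = min best (pvMinCounts (List.replicate run.toNat prev ++ s)) := by
  induction s with
  | nil =>
    intro prev run best hr2 _
    simp only [pvScan, List.append_nil]
    rw [pvMinCounts_replicate _ (by omega) prev, Int.toNat_of_nonneg (by omega)]
  | cons x xs ih =>
    intro prev run best hr hs
    by_cases hx : x = prev
    · subst hx
      simp only [pvScan]
      have hs' : (x :: xs).Pairwise (fun a b => a ≤ b) := by
        rcases List.pairwise_cons.mp hs with ⟨hle, ht⟩
        exact List.pairwise_cons.mpr ⟨fun y hy => hle y (List.mem_cons_of_mem _ hy), (List.pairwise_cons.mp ht).2⟩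
      rw [ih x (run + 1) best (by omega) hs']
      have hlist : List.replicate (run + 1).toNat x ++ xs = List.replicate run.toNat x ++ x :: xs := by
        have h2 : (run + 1).toNat = run.toNat + 1 := by omega
        rw [h2, List.replicate_succ']
        simp
      rw [hlist]
      simp
    · simp only [pvScan, if_neg hx]
      have htail : (x :: xs).Pairwise (fun a b => a ≤ b) := (List.pairwise_cons.mp hs).2
      rw [ih x 1 (min best run) (by omega) htail]
      have h1 : (List.replicate (1 : Int).toNat x ++ xs) = x :: xs := by simp
      rw [h1]
      have hnotmem : prev ∉ x :: xs := by
        rcases List.pairwise_cons.mp hs with ⟨hle, _⟩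
        intro hmem
        rcases List.mem_cons.mp hmem with h | h
        · exact hx h.symm
        · have hxy : x ≤ prev := by
            rcases List.pairwise_cons.mp htail with ⟨hle2, _⟩
            -- prev ∈ xs, so x ≤ prev
            exact hle2 prev h
          have : prev ≤ x := hle x (List.mem_cons_self)
          exact hx (le_antisymm hxy this)
      rw [pvMinCounts_append (List.replicate run.toNat prev) (x :: xs)
        (by simp; omega) (by simp)
        (by intro y hy; rw [List.eq_of_mem_replicate hy]; exact hnotmem)]
      rw [pvMinCounts_replicate _ (by omega) prev, Int.toNat_of_nonneg (by omega)]
      rw [min_assoc]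

-- sorted_pairwise transported to the port's elaborated order instance on List String
theorem sorted_pairwise_port (keys : List (List String)) :
    (PySem.List.sorted keys (fun x : List String => x) false).Pairwise (fun a b => a ≤ b) := by
  have h := PySem.List.sorted_pairwise keys (fun x : List String => x)
  convert h using 2

theorem calc_k_eq (records : List (List (String × String))) (quasi_identifiers : List String) :
    calculate_k_anonymity records quasi_identifiers = calculate_k_anonymity_alt records quasi_identifiers := by
  unfold calculate_k_anonymity calculate_k_anonymity_alt
  have hfold : records.foldl
      (fun d r => d.insert (pvKey quasi_identifiers r) (d.getD (pvKey quasi_identifiers r) 0 + 1))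
      PySem.Dict.empty
      = PySem.Dict.counter (records.map (pvKey quasi_identifiers)) := by
    rw [← PySem.Dict.foldl_insert_getD_add_one_eq_counter, List.foldl_map]
  rw [hfold]
  set keys := records.map (pvKey quasi_identifiers) with hkeys
  have hperm : (PySem.List.sorted keys (fun x => x) false).Perm keys := PySem.List.sorted_perm keys _ _
  cases hsk : PySem.List.sorted keys (fun x => x) false with
  | nil =>
    have hknil : keys = [] := (PySem.List.sorted_eq_nil_iff keys (fun x => x) false).mp hsk
    have hz : PySem.Dict.size (PySem.Dict.counter keys) = 0 := by
      rw [hknil]; rfl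
    simp [hz]
  | cons k0 rest =>
    have hknil : keys ≠ [] := by
      intro h
      have hnil : PySem.List.sorted keys (fun x => x) false = [] := (PySem.List.sorted_eq_nil_iff keys (fun x => x) false).mpr h
      rw [hnil] at hsk
      exact List.cons_ne_nil _ _ hsk.symm
    have hsnil : PySem.Set.ofList keys ≠ [] := by
      intro h
      cases hk2 : keys with
      | nil => exact hknil hk2
      | cons a t =>
        have : a ∈ PySem.Set.ofList keys := by rw [PySem.Set.mem_ofList]; simp [hk2]
        rw [h] at this; exact (List.not_mem_nil) this
    have hitems : (PySem.Dict.counter keys).items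
        = (PySem.Set.ofList keys).map (fun k => (k, (keys.count k : Int))) :=
      PySem.Dict.items_counter keys
    have hsize : PySem.Dict.size (PySem.Dict.counter keys) ≠ 0 := by
      simp only [PySem.Dict.size, hitems, List.length_map]
      intro h
      exact hsnil (List.eq_nil_of_length_eq_zero h)
    rw [if_neg hsize]
    have hvals : PySem.Dict.values (PySem.Dict.counter keys)
        = (PySem.Set.ofList keys).map (fun k => (keys.count k : Int)) := by
      simp only [PySem.Dict.values, hitems, List.map_map]; rfl
    rw [hvals]
    -- A's value is the min of per-key counts over the distinct keys = pvMinCounts keys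
    have hA : (PySem.List.min? ((PySem.Set.ofList keys).map (fun k => (keys.count k : Int))) (fun x => x)).getD 0
        = pvMinCounts keys := by
      unfold pvMinCounts
      apply minD_congr_mem
      · intro h; exact hsnil (List.map_eq_nil_iff.mp h)
      · intro h; exact hknil (List.map_eq_nil_iff.mp h)
      · intro x
        simp only [List.mem_map, PySem.Set.mem_ofList]
    rw [hA]
    -- B's value: run scan over the sorted keys
    have hpair : (k0 :: rest).Pairwise (fun (a b : List String) => a ≤ b) := by
      have hp0 := sorted_pairwise_port keys
      rw [hsk] at hp0
      exact hp0
    have hperm' : (k0 :: rest).Perm keys := by rw [← hsk]; exact hperm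
    show pvMinCounts keys = pvScan k0 1 ((k0 :: rest).length : Int) rest
    rw [pvScan_spec rest k0 1 ((k0 :: rest).length : Int) (by omega) hpair]
    have h1 : (List.replicate (1 : Int).toNat k0 ++ rest) = k0 :: rest := by simp
    rw [h1, pvMinCounts_congr (k0 :: rest) keys hperm']
    -- the min count is at most the list length, so the initial best doesn't matter
    have hle : pvMinCounts keys ≤ ((k0 :: rest).length : Int) := by
      have hk0 : k0 ∈ keys := hperm'.mem_iff.mp (List.mem_cons_self)
      have := pvMinCounts_le_count keys k0 hk0
      have hcle : (keys.count k0 : Int) ≤ (keys.length : Int) := by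
        exact_mod_cast List.count_le_length
      have hlen : keys.length = (k0 :: rest).length := hperm'.length_eq.symm
      omega
    omega

-- ===== VERDICT (by name: the statement is the Claim_ definition above) =====
theorem calculate_k_anonymity_spec : Claim_equal_calculate_k_anonymity := by
  intro records qis _
  unfold Spec_calculate_k_anonymity
  exact calc_k_eq records qis
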